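-- pv_equiv track=rewrite | github.com/endsley/vessence | vessence/scripts/check_jane_platform_parity.py | classify_paths
-- ===== SOURCE A (Python) =====
-- WEB_PREFIXES = (
--     "jane_web/",
--     "vault_web/templates/jane.html",
--     "vault_web/static/",
--     "vessence/jane_web/",
--     "vessence/vault_web/templates/jane.html",
--     "vessence/vault_web/static/",
-- )
--
-- ANDROID_PREFIXES = (
--     "android/app/src/main/java/com/vessences/android/ui/chat/",
--     "android/app/src/main/java/com/vessences/android/ui/components/MessageBubble.kt",
--     "vessence/android/app/src/main/java/com/vessences/android/ui/chat/",
--     "vessence/android/app/src/main/java/com/vessences/android/ui/components/MessageBubble.kt",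
-- )
--
-- def _normalize(path: str) -> str:
--     return path.strip().replace("\\", "/")
--
-- def classify_paths(paths: list[str]) -> tuple[bool, bool]:
--     web_changed = False
--     android_changed = False
--     for raw in paths:
--         path = _normalize(raw)
--         if not path:
--             continue
--         if any(path.startswith(prefix) for prefix in WEB_PREFIXES):
--             web_changed = True
--         if any(path.startswith(prefix) for prefix in ANDROID_PREFIXES):
--             android_changed = True
--     return web_changed, android_changed
-- ===== SOURCE B (Python) =====
-- WEB_PREFIXES = (
--     "jane_web/",
--     "vault_web/templates/jane.html",
--     "vault_web/static/",
--     "vessence/jane_web/",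
--     "vessence/vault_web/templates/jane.html",
--     "vessence/vault_web/static/",
-- )
--
-- ANDROID_PREFIXES = (
--     "android/app/src/main/java/com/vessences/android/ui/chat/",
--     "android/app/src/main/java/com/vessences/android/ui/components/MessageBubble.kt",
--     "vessence/android/app/src/main/java/com/vessences/android/ui/chat/",
--     "vessence/android/app/src/main/java/com/vessences/android/ui/components/MessageBubble.kt",
-- )
--
-- # Hash-index the prefixes once: a path matches iff one of its length-k
-- # truncations (k a distinct prefix length) is literally in the prefix set.
-- _WEB_SET = set(WEB_PREFIXES)
-- _WEB_LENS = sorted({len(p) for p in WEB_PREFIXES})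
-- _ANDROID_SET = set(ANDROID_PREFIXES)
-- _ANDROID_LENS = sorted({len(p) for p in ANDROID_PREFIXES})
--
--
-- def _matched(path: str, lens: list[int], table: set[str]) -> bool:
--     return any(path[:k] in table for k in lens)
--
--
-- def classify_paths(paths: list[str]) -> tuple[bool, bool]:
--     normalized = [p.strip().replace("\\", "/") for p in paths]
--     return (
--         any(_matched(p, _WEB_LENS, _WEB_SET) for p in normalized),
--         any(_matched(p, _ANDROID_LENS, _ANDROID_SET) for p in normalized),
--     )
-- ===== Notes on version B (the rewrite author's own statement) =====
-- stated objective: alternative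
-- what changed: Replaces the per-path linear startswith scan over the prefix tuples by a precomputed hash set of prefixes plus the distinct prefix lengths: a path matches iff one of its length-k truncations is literally in the set, so the inner prefix scan becomes set membership of slices; the stateful fused loop with the empty-path guard becomes two independent any-passes.
import Mathlib
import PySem

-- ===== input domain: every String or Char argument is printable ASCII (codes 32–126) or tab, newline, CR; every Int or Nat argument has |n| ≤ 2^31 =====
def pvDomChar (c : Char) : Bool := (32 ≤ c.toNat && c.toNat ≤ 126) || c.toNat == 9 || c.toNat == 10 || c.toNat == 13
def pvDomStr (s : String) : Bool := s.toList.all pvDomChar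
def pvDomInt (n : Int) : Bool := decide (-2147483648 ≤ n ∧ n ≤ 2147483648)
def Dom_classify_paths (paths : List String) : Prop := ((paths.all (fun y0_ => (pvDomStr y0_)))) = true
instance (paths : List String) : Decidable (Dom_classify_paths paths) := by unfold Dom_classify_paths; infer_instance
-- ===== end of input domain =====

-- B replaces A's per-path linear startswith scan over the prefix tuples by a precomputed
-- prefix set plus the distinct prefix lengths: a path matches iff one of its length-k
-- truncations is literally in the set; objective: alternative (set lookup of slices, same cost class).

def pvWebPrefixes : List String :=
  [ "jane_web/",
    "vault_web/templates/jane.html",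
    "vault_web/static/",
    "vessence/jane_web/",
    "vessence/vault_web/templates/jane.html",
    "vessence/vault_web/static/" ]

def pvAndroidPrefixes : List String :=
  [ "android/app/src/main/java/com/vessences/android/ui/chat/",
    "android/app/src/main/java/com/vessences/android/ui/components/MessageBubble.kt",
    "vessence/android/app/src/main/java/com/vessences/android/ui/chat/",
    "vessence/android/app/src/main/java/com/vessences/android/ui/components/MessageBubble.kt" ]

-- _normalize: path.strip().replace("\\", "/")
def pvNormalize (path : String) : String :=
  PySem.Str.replace (PySem.Str.strip path) "\\" "/"

-- ===== PORT A =====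
def classify_paths (paths : List String) : Bool × Bool :=
  paths.foldl
    (fun st raw =>
      let path := pvNormalize raw
      if path = "" then st
      else
        let st1 := if pvWebPrefixes.any (fun pre => PySem.Str.startswith path pre) then (true, st.2) else st
        if pvAndroidPrefixes.any (fun pre => PySem.Str.startswith path pre) then (st1.1, true) else st1)
    (false, false)

-- ===== PORT B =====
-- _WEB_SET / _WEB_LENS / _ANDROID_SET / _ANDROID_LENS (module-level precomputation)
def pvWebSet : PySem.Set String := PySem.Set.ofList pvWebPrefixes
def pvWebLens : List Int :=
  PySem.List.sorted (PySem.Set.ofList (pvWebPrefixes.map (fun s => PySem.Str.len s))) (fun x => x) false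
def pvAndroidSet : PySem.Set String := PySem.Set.ofList pvAndroidPrefixes
def pvAndroidLens : List Int :=
  PySem.List.sorted (PySem.Set.ofList (pvAndroidPrefixes.map (fun s => PySem.Str.len s))) (fun x => x) false

-- _matched(path, lens, table) = any(path[:k] in table for k in lens)
def pvMatched (path : String) (lens : List Int) (table : PySem.Set String) : Bool :=
  lens.any (fun k => PySem.Set.contains table (PySem.Str.slice path none (some k)))

def classify_paths_alt (paths : List String) : Bool × Bool :=
  let normalized := paths.map pvNormalize
  (normalized.any (fun p => pvMatched p pvWebLens pvWebSet),
   normalized.any (fun p => pvMatched p pvAndroidLens pvAndroidSet))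

-- ===== PRECONDITION & SPEC =====
def Spec_classify_paths (paths : List String) (out : Bool × Bool) : Prop := out = classify_paths_alt paths
instance (paths : List String) (out : Bool × Bool) : Decidable (Spec_classify_paths paths out) := by unfold Spec_classify_paths; infer_instance

-- ===== CLAIM (what is proved, stated in full; the proofs are below) =====
def Claim_equal_classify_paths : Prop := ∀ (paths : List String), Dom_classify_paths paths → Spec_classify_paths paths (classify_paths paths)

-- ===== LEMMAS AND PROOFS =====

-- A's guarded flag-setting loop, with the normalizer and the two per-path tests abstracted,
-- equals two independent any-scans, provided neither test matches the empty string.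
theorem pvLoop_eq (norm : String → String) (f g : String → Bool)
    (hf : f "" = false) (hg : g "" = false) :
    ∀ (xs : List String) (w a : Bool),
    xs.foldl (fun st raw =>
      let path := norm raw
      if path = "" then st
      else
        let st1 := if f path then (true, st.2) else st
        if g path then (st1.1, true) else st1) (w, a)
    = (w || (xs.map norm).any f, a || (xs.map norm).any g)
  | [], w, a => by simp
  | raw :: rest, w, a => by
    simp only [List.foldl_cons, List.map_cons, List.any_cons]
    by_cases h : norm raw = ""
    · rw [h]
      simp [hf, hg, pvLoop_eq norm f g hf hg rest]
    · cases hfw : f (norm raw) <;> cases hgw : g (norm raw) <;>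
        simp [h, hfw, hgw, pvLoop_eq norm f g hf hg rest]

-- The per-path tests agree: a startswith scan over a prefix list equals set membership of the
-- length-k truncations, for any list L holding exactly the prefix lengths.
theorem pvLen_nonneg (s : String) : 0 ≤ PySem.Str.len s := by
  rw [PySem.Str.len_eq]; exact Int.natCast_nonneg _

theorem pvTest_eq (ps : List String) (L : List Int)
    (hL : ∀ k, k ∈ L ↔ k ∈ ps.map (fun s => PySem.Str.len s)) (p : String) :
    ps.any (fun pre => PySem.Str.startswith p pre)
      = L.any (fun k => PySem.Set.contains (PySem.Set.ofList ps) (PySem.Str.slice p none (some k))) := by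
  rw [Bool.eq_iff_iff]
  simp only [List.any_eq_true, PySem.Set.contains_iff, PySem.Set.mem_ofList]
  constructor
  · rintro ⟨pre, hpre, hsw⟩
    refine ⟨PySem.Str.len pre, (hL _).mpr (List.mem_map.mpr ⟨pre, hpre, rfl⟩), ?_⟩
    have hpfx : pre.toList <+: p.toList := by
      have h1 : PySem.Chars.startswith p.toList pre.toList = true := by
        rw [← PySem.Str.startswith_eq]; exact hsw
      exact (PySem.Chars.startswith_iff _ _).mp h1
    have htake : p.toList.take pre.toList.length = pre.toList :=
      (List.prefix_iff_eq_take.mp hpfx).symm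
    have hslice : (PySem.Str.slice p none (some (PySem.Str.len pre))).toList = pre.toList := by
      rw [PySem.Str.toList_slice]
      show PySem.List.slice p.toList none (some (PySem.Str.len pre)) = pre.toList
      rw [PySem.List.slice_to _ (pvLen_nonneg pre), PySem.Str.len_eq]
      simpa using htake
    have h2 : PySem.Str.slice p none (some (PySem.Str.len pre)) = pre := String.toList_inj.mp hslice
    rw [h2]; exact hpre
  · rintro ⟨k, hkL, hmem⟩
    refine ⟨PySem.Str.slice p none (some k), hmem, ?_⟩
    obtain ⟨pre, _, hlen⟩ := List.mem_map.mp ((hL k).mp hkL)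
    have hk0 : 0 ≤ k := hlen ▸ pvLen_nonneg pre
    rw [PySem.Str.startswith_eq]
    refine (PySem.Chars.startswith_iff _ _).mpr ?_
    rw [PySem.Str.toList_slice]
    show PySem.List.slice p.toList none (some k) <+: p.toList
    rw [PySem.List.slice_to _ hk0]
    exact List.take_prefix _ _

theorem pvWebLens_mem : ∀ k, k ∈ pvWebLens ↔ k ∈ pvWebPrefixes.map (fun s => PySem.Str.len s) := by
  have h1 : pvWebLens = [9, 17, 18, 26, 29, 38] := by decide
  have h2 : pvWebPrefixes.map (fun s => PySem.Str.len s) = [9, 29, 17, 18, 38, 26] := by decide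
  intro k
  rw [h1, h2]
  simp only [List.mem_cons, List.not_mem_nil]
  tauto

theorem pvAndroidLens_mem : ∀ k, k ∈ pvAndroidLens ↔ k ∈ pvAndroidPrefixes.map (fun s => PySem.Str.len s) := by
  have h1 : pvAndroidLens = [56, 65, 78, 87] := by decide
  have h2 : pvAndroidPrefixes.map (fun s => PySem.Str.len s) = [56, 78, 65, 87] := by decide
  intro k
  rw [h1, h2]
  simp only [List.mem_cons, List.not_mem_nil]
  tauto

-- ===== VERDICT (by name: the statement is the Claim_ definition above) =====
theorem classify_paths_spec : Claim_equal_classify_paths := by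
  intro paths _
  show classify_paths paths = classify_paths_alt paths
  have hw : (fun p => pvWebPrefixes.any (fun pre => PySem.Str.startswith p pre))
      = (fun p => pvMatched p pvWebLens pvWebSet) :=
    funext fun p => pvTest_eq pvWebPrefixes pvWebLens pvWebLens_mem p
  have ha : (fun p => pvAndroidPrefixes.any (fun pre => PySem.Str.startswith p pre))
      = (fun p => pvMatched p pvAndroidLens pvAndroidSet) :=
    funext fun p => pvTest_eq pvAndroidPrefixes pvAndroidLens pvAndroidLens_mem p
  have h := pvLoop_eq pvNormalize
      (fun p => pvWebPrefixes.any (fun pre => PySem.Str.startswith p pre))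
      (fun p => pvAndroidPrefixes.any (fun pre => PySem.Str.startswith p pre))
      (by decide) (by decide) paths false false
  rw [hw, ha] at h
  simpa [classify_paths, classify_paths_alt, hw, ha] using h
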